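-- pv_equiv track=rewrite | github.com/thebestpatrick/msu-bikedata | obsprocrep.py | _merge_to_report_d
-- ===== SOURCE A (Python) =====
-- def _merge_to_report_d(racks_d, i2):
--     rlocale_list = list(racks_d.keys())
--     ilocale_list = list(i2.keys())
--     tlocale_list = rlocale_list + ilocale_list
--
--     flocales = []
--     for i in tlocale_list:
--         if i in flocales:
--             continue
--         flocales.append(i)
--
--     fd = {}
--
--     for f in flocales:
--         rdd = racks_d.get(f)
--         idd = i2.get(f)
--         fd[f] = {
--                 'loc_info': idd,
--                 'rack_info': rdd
--                 }
--     return fd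
-- ===== SOURCE B (Python) =====
-- def _merge_to_report_d(racks_d, i2):
--     fd = {}
--     for f, rv in racks_d.items():
--         fd[f] = {'loc_info': i2.get(f), 'rack_info': rv}
--     for f, iv in i2.items():
--         if f not in fd:
--             fd[f] = {'loc_info': iv, 'rack_info': None}
--     return fd
-- ===== Notes on version B (the rewrite author's own statement) =====
-- stated objective: faster
-- what changed: Removes the concatenated key list and the separate dedup pass entirely: B builds the report dict in two direct passes over racks_d.items() and i2.items(), skipping i2 keys already present, and reads each value from the pair being iterated instead of re-looking it up with .get.
import Mathlib
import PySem

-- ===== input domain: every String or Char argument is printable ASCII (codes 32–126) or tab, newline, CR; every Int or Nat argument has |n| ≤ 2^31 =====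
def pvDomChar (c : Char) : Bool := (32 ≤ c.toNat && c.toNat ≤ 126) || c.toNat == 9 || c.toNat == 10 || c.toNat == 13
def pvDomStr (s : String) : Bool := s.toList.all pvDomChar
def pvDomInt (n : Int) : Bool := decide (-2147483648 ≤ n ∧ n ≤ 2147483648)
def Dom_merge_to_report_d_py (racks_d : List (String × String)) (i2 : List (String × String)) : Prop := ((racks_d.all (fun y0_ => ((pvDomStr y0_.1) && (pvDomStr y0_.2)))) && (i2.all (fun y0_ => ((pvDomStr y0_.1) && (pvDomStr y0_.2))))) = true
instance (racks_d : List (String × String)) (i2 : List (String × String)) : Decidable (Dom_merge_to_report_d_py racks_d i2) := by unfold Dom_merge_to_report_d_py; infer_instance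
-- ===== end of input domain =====

-- B replaces A's concatenate-keys-then-dedup-then-rebuild pipeline by two direct passes
-- over the two dicts' items (skipping already-present keys), which is simpler and avoids
-- the quadratic list-membership dedup; return values proved equal on the whole domain.

-- ===== PORT A =====
def merge_to_report_d_py (racks_d : List (String × String)) (i2 : List (String × String)) : List (String × List (String × Option String)) :=
  let rd : PySem.Dict String String := PySem.Dict.ofList racks_d
  let id : PySem.Dict String String := PySem.Dict.ofList i2
  let rlocale_list := rd.keys
  let ilocale_list := id.keys
  let tlocale_list := rlocale_list ++ ilocale_list
  -- for i in tlocale_list: if i in flocales: continue; flocales.append(i)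
  let flocales := tlocale_list.foldl (fun acc i => if acc.contains i then acc else acc ++ [i]) []
  -- for f in flocales: fd[f] = {'loc_info': i2.get(f), 'rack_info': racks_d.get(f)}
  let fd := flocales.foldl
    (fun fd f => fd.insert f [("loc_info", id.get? f), ("rack_info", rd.get? f)])
    (PySem.Dict.empty : PySem.Dict String (List (String × Option String)))
  fd.items

-- ===== PORT B =====
def merge_to_report_d_py_alt (racks_d : List (String × String)) (i2 : List (String × String)) : List (String × List (String × Option String)) :=
  let rd : PySem.Dict String String := PySem.Dict.ofList racks_d
  let id : PySem.Dict String String := PySem.Dict.ofList i2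
  -- for f, rv in racks_d.items(): fd[f] = {'loc_info': i2.get(f), 'rack_info': rv}
  let fd1 := rd.items.foldl
    (fun fd p => fd.insert p.1 [("loc_info", id.get? p.1), ("rack_info", some p.2)])
    (PySem.Dict.empty : PySem.Dict String (List (String × Option String)))
  -- for f, iv in i2.items(): if f not in fd: fd[f] = {'loc_info': iv, 'rack_info': None}
  let fd2 := id.items.foldl
    (fun fd p => if fd.contains p.1 then fd else fd.insert p.1 [("loc_info", some p.2), ("rack_info", none)])
    fd1
  fd2.items

-- ===== PRECONDITION & SPEC =====
def Spec_merge_to_report_d_py (racks_d : List (String × String)) (i2 : List (String × String)) (out : List (String × List (String × Option String))) : Prop := out = merge_to_report_d_py_alt racks_d i2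
instance (racks_d : List (String × String)) (i2 : List (String × String)) (out : List (String × List (String × Option String))) : Decidable (Spec_merge_to_report_d_py racks_d i2 out) := by unfold Spec_merge_to_report_d_py; infer_instance

-- ===== CLAIM (what is proved, stated in full; the proofs are below) =====
def Claim_equal_merge_to_report_d_py : Prop := ∀ (racks_d : List (String × String)) (i2 : List (String × String)), Dom_merge_to_report_d_py racks_d i2 → Spec_merge_to_report_d_py racks_d i2 (merge_to_report_d_py racks_d i2)

-- ===== LEMMAS AND PROOFS =====

-- B's guarded second loop appends exactly the entries whose keys are new to d.
theorem guarded_foldl_items {ν : Type} (l : List (String × String))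
    (d : PySem.Dict String ν) (v : String × String → ν)
    (hnd : d.keys.Nodup) (hl : (l.map Prod.fst).Nodup) :
    (l.foldl (fun fd p => if fd.contains p.1 then fd else fd.insert p.1 (v p)) d).items
      = d.items ++ (l.filter (fun p => !(d.contains p.1))).map (fun p => (p.1, v p)) := by
  induction l generalizing d with
  | nil => simp
  | cons p l ih =>
    simp only [List.map_cons, List.nodup_cons] at hl
    by_cases hc : d.contains p.1
    · simp only [List.foldl_cons, hc, if_true, List.filter_cons, Bool.not_eq_true']
      rw [ih d hnd hl.2]
      simp
    · have hcb : d.contains p.1 = false := by simpa using hc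
      simp only [List.foldl_cons, List.filter_cons, hcb, Bool.false_eq_true, if_false,
        Bool.not_false, if_true]
      rw [ih (d.insert p.1 (v p)) (PySem.Dict.nodup_keys_insert d p.1 (v p) hnd) hl.2]
      rw [PySem.Dict.items_insert_of_not_contains d (v p) hcb]
      have hfilter : l.filter (fun q => !((d.insert p.1 (v p)).contains q.1))
          = l.filter (fun q => !(d.contains q.1)) := by
        apply List.filter_congr
        intro q hq
        have hne : q.1 ≠ p.1 := fun h => hl.1 (h ▸ List.mem_map_of_mem hq)
        rw [PySem.Dict.contains_insert d p.1 q.1 (v p)]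
        simp [hne]
      rw [hfilter]
      simp [List.append_assoc]

theorem merge_to_report_d_py_eq (racks_d : List (String × String)) (i2 : List (String × String)) :
    merge_to_report_d_py racks_d i2 = merge_to_report_d_py_alt racks_d i2 := by
  unfold merge_to_report_d_py merge_to_report_d_py_alt
  dsimp only
  set rd := PySem.Dict.ofList racks_d with hrd
  set id := PySem.Dict.ofList i2 with hid
  have hrnd : rd.keys.Nodup := PySem.Dict.nodup_keys_ofList racks_d
  have hind : id.keys.Nodup := PySem.Dict.nodup_keys_ofList i2
  -- A's dedup loop is exactly Set.ofList of the concatenated key lists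
  have hadd : (fun (acc : List String) i => if acc.contains i then acc else acc ++ [i])
      = PySem.Set.add := by
    funext s x
    rw [PySem.Set.add_eq_ite]
    by_cases h : x ∈ s <;> simp [h]
  have hfl : (rd.keys ++ id.keys).foldl
        (fun acc i => if acc.contains i then acc else acc ++ [i]) []
      = rd.keys ++ id.keys.filter (fun y => !rd.keys.contains y) := by
    rw [hadd, ← PySem.Set.ofList_eq_foldl, PySem.Set.ofList_append,
      PySem.Set.ofList_eq_self_of_nodup rd.keys hrnd,
      PySem.Set.update_eq_append_filter,
      PySem.Set.ofList_eq_self_of_nodup id.keys hind]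
    simp
  rw [hfl]
  -- names for the two value functions
  have hg : ∀ y ∈ id.keys.filter (fun y => !rd.keys.contains y), y ∉ rd.keys := by
    intro y hy
    have := (List.mem_filter.mp hy).2
    simp at this
    exact this
  have hflnd : (rd.keys ++ id.keys.filter (fun y => !rd.keys.contains y)).Nodup := by
    refine List.Nodup.append hrnd (hind.filter _) ?_
    intro a ha hb
    exact hg a hb ha
  rw [PySem.Dict.items_foldl_insert_fresh
        (rd.keys ++ id.keys.filter (fun y => !rd.keys.contains y))
        (fun f => f)
        (fun f => [("loc_info", id.get? f), ("rack_info", rd.get? f)])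
        PySem.Dict.empty
        (by intro a _; simp [PySem.Dict.contains_empty])
        (by simpa using hflnd)]
  have hkeys_items : rd.keys = rd.items.map Prod.fst := rfl
  set fd1 := List.foldl
      (fun fd p => fd.insert p.1 [("loc_info", id.get? p.1), ("rack_info", some p.2)])
      (PySem.Dict.empty : PySem.Dict String (List (String × Option String))) rd.items with hfd1
  have hfd1keys : fd1.keys = rd.keys := by
    rw [hfd1, PySem.Dict.keys_foldl_insert_key rd.items Prod.fst
          (fun _ p => [("loc_info", id.get? p.1), ("rack_info", some p.2)]) PySem.Dict.empty,
      PySem.Dict.keys_empty, PySem.Set.update_nil_left, ← hkeys_items,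
      PySem.Set.ofList_eq_self_of_nodup rd.keys hrnd]
  have hfd1nd : fd1.keys.Nodup := by rw [hfd1keys]; exact hrnd
  rw [guarded_foldl_items id.items fd1
        (fun p => [("loc_info", some p.2), ("rack_info", none)]) hfd1nd
        (by exact hind)]
  rw [hfd1, PySem.Dict.items_foldl_insert_fresh rd.items Prod.fst
        (fun p => [("loc_info", id.get? p.1), ("rack_info", some p.2)])
        PySem.Dict.empty
        (by intro a _; simp [PySem.Dict.contains_empty])
        (by exact hrnd)]
  rw [← hfd1]
  have h1 : List.map (fun a => (a, [("loc_info", id.get? a), ("rack_info", rd.get? a)])) rd.keys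
      = List.map (fun a => (a.1, [("loc_info", id.get? a.1), ("rack_info", some a.2)])) rd.items := by
    rw [hkeys_items, List.map_map]
    apply List.map_congr_left
    intro p hp
    simp only [Function.comp]
    rw [PySem.Dict.get?_of_mem_items rd hp hrnd]
  have h2 : List.map (fun a => (a, [("loc_info", id.get? a), ("rack_info", rd.get? a)]))
        (List.filter (fun y => !rd.keys.contains y) id.keys)
      = List.map (fun p => (p.1, [("loc_info", some p.2), ("rack_info", none)]))
        (List.filter (fun p => !fd1.contains p.1) id.items) := by
    have hpred : List.filter (fun p => !fd1.contains p.1) id.items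
        = List.filter (fun p => !rd.keys.contains p.1) id.items := by
      apply List.filter_congr
      intro q _
      have : fd1.contains q.1 = rd.keys.contains q.1 := by
        rw [Bool.eq_iff_iff]
        simp [PySem.Dict.contains_iff_mem_keys, hfd1keys]
      rw [this]
    rw [hpred]
    have hkeys : (id.keys : List String) = id.items.map Prod.fst := rfl
    rw [hkeys, List.filter_map, List.map_map]
    apply List.map_congr_left
    intro q hq
    have hmem : q ∈ id.items := List.mem_of_mem_filter hq
    have hcond : (!rd.keys.contains q.1) = true := by
      have := List.of_mem_filter hq
      simpa using this
    have hnotin : q.1 ∉ rd.keys := by simpa using hcond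
    have hrdnone : rd.get? q.1 = none := by
      rw [PySem.Dict.get?_eq_none_iff_contains]
      rw [← Bool.not_eq_true]
      intro hc
      exact hnotin ((PySem.Dict.contains_iff_mem_keys rd q.1).mp hc)
    simp only [Function.comp]
    rw [PySem.Dict.get?_of_mem_items id hmem hind, hrdnone]
  rw [List.map_append, h1, h2, List.append_assoc]

-- ===== VERDICT (by name: the statement is the Claim_ definition above) =====
theorem merge_to_report_d_py_spec : Claim_equal_merge_to_report_d_py := by
  intro racks_d i2 _
  exact merge_to_report_d_py_eq racks_d i2
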